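-- pv_equiv track=rewrite | github.com/sunoru/splatoon-privas | src/privas/utils.py | find_language
-- ===== SOURCE A (Python) =====
-- def find_language(languages, language):
--     lower_languages = list(x.lower() for x in languages)
--     language = language.lower()
--     for i, each in enumerate(lower_languages):
--         if each == language:
--             return i, languages[i]
--     for i, each in enumerate(lower_languages):
--         if each.startswith(language):
--             return i, languages[i]
--     return -1, None
-- ===== SOURCE B (Python) =====
-- def find_language(languages, language):
--     language = language.lower()
--     first_prefix = -1
--     for i, each in enumerate(languages):
--         low = each.lower()
--         if low == language:
--             return i, languages[i]
--         if first_prefix < 0 and low.startswith(language):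
--             first_prefix = i
--     if first_prefix >= 0:
--         return first_prefix, languages[first_prefix]
--     return -1, None
-- ===== Notes on version B (the rewrite author's own statement) =====
-- stated objective: alternative
-- what changed: Replaced A's two full scans over a precomputed lowered list by one single pass over the original list that returns eagerly on an exact match and records only the first prefix match for use after the loop.
import Mathlib
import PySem

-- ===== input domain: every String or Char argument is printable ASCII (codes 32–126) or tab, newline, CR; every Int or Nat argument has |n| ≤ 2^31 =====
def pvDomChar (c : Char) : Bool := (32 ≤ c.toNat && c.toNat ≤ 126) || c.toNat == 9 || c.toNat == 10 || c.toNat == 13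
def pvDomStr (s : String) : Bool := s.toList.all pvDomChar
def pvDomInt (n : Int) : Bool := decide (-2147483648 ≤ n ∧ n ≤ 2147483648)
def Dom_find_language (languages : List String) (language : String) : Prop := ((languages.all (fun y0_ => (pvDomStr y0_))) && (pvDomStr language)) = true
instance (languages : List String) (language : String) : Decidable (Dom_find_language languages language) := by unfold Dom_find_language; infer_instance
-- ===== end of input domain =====

-- B merges A's two full scans (exact, then prefix) into a single pass that returns eagerly on an
-- exact match and records the first prefix match; alternative decomposition, same asymptotic cost.


-- ===== PORT A =====
-- first loop of A: 'for i, each in enumerate(lower_languages): if each == language: return i, languages[i]'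
def pvLoopA1 (langs : List String) (lang : String) : List (Int × String) → Option (Int × Option String)
  | [] => none
  | (i, each) :: rest =>
    if each == lang then some (i, PySem.List.pyGet? langs i)
    else pvLoopA1 langs lang rest

-- second loop of A: 'if each.startswith(language): return i, languages[i]'
def pvLoopA2 (langs : List String) (lang : String) : List (Int × String) → Option (Int × Option String)
  | [] => none
  | (i, each) :: rest =>
    if PySem.Str.startswith each lang then some (i, PySem.List.pyGet? langs i)
    else pvLoopA2 langs lang rest

def find_language (languages : List String) (language : String) : Int × Option String :=
  let lower_languages := languages.map PySem.Str.lower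
  let language := PySem.Str.lower language
  match pvLoopA1 languages language (PySem.List.enumerate lower_languages 0) with
  | some r => r
  | none =>
    match pvLoopA2 languages language (PySem.List.enumerate lower_languages 0) with
    | some r => r
    | none => (-1, none)

-- ===== PORT B =====
-- B's single pass with the 'first_prefix' accumulator
def pvLoopB (langs : List String) (lang : String) : List (Int × String) → Int → Int × Option String
  | [], fp =>
    if 0 ≤ fp then (fp, PySem.List.pyGet? langs fp) else (-1, none)
  | (i, each) :: rest, fp =>
    let low := PySem.Str.lower each
    if low == lang then (i, PySem.List.pyGet? langs i)
    else pvLoopB langs lang rest (if fp < 0 && PySem.Str.startswith low lang then i else fp)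

def find_language_alt (languages : List String) (language : String) : Int × Option String :=
  pvLoopB languages (PySem.Str.lower language) (PySem.List.enumerate languages 0) (-1)

-- ===== PRECONDITION & SPEC =====
def Spec_find_language (languages : List String) (language : String) (out : Int × Option String) : Prop := out = find_language_alt languages language
instance (languages : List String) (language : String) (out : Int × Option String) : Decidable (Spec_find_language languages language out) := by unfold Spec_find_language; infer_instance

-- ===== CLAIM (what is proved, stated in full; the proofs are below) =====
def Claim_equal_find_language : Prop := ∀ (languages : List String) (language : String), Dom_find_language languages language → Spec_find_language languages language (find_language languages language)

-- ===== LEMMAS AND PROOFS =====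

theorem enumerate_map_lower (xs : List String) (s : Int) :
    PySem.List.enumerate (xs.map PySem.Str.lower) s
      = (PySem.List.enumerate xs s).map (fun p => (p.1, PySem.Str.lower p.2)) := by
  induction xs generalizing s with
  | nil => simp [PySem.List.enumerate_nil]
  | cons x xs ih => simp [PySem.List.enumerate_cons, ih]

theorem pvLoopB_eq (langs : List String) (lang : String) :
    ∀ (ps : List (Int × String)) (fp : Int), (∀ p ∈ ps, 0 ≤ p.1) →
      pvLoopB langs lang ps fp
        = match pvLoopA1 langs lang (ps.map (fun p => (p.1, PySem.Str.lower p.2))) with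
          | some r => r
          | none =>
            if 0 ≤ fp then (fp, PySem.List.pyGet? langs fp)
            else
              match pvLoopA2 langs lang (ps.map (fun p => (p.1, PySem.Str.lower p.2))) with
              | some r => r
              | none => (-1, none) := by
  intro ps
  induction ps with
  | nil => intro fp _; simp [pvLoopB, pvLoopA1, pvLoopA2]
  | cons p rest ih =>
    intro fp hpos
    obtain ⟨i, each⟩ := p
    have hi : 0 ≤ i := hpos (i, each) (by simp)
    have hrest : ∀ q ∈ rest, 0 ≤ q.1 := fun q hq => hpos q (by simp [hq])
    by_cases he : PySem.Str.lower each == lang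
    · simp [pvLoopB, pvLoopA1, he]
    · by_cases hfp : fp < 0
      · by_cases hsw : PySem.Str.startswith (PySem.Str.lower each) lang
        · simp only [pvLoopB, pvLoopA1, pvLoopA2, List.map_cons, he, hsw,
            if_false, if_true, Bool.false_eq_true]
          rw [show (if (decide (fp < 0) && true) = true then i else fp) = i by simp [hfp]]
          rw [ih i hrest]
          simp [hi, not_le.mpr hfp]
        · simp only [pvLoopB, pvLoopA1, pvLoopA2, List.map_cons, he, hsw,
            Bool.false_eq_true, if_false]
          rw [show (if (decide (fp < 0) && false) = true then i else fp) = fp by simp]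
          rw [ih fp hrest]
      · simp only [pvLoopB, pvLoopA1, pvLoopA2, List.map_cons, he, Bool.false_eq_true, if_false]
        rw [show (if (decide (fp < 0) && PySem.Str.startswith (PySem.Str.lower each) lang) = true
              then i else fp) = fp by simp [hfp]]
        rw [ih fp hrest]
        simp [not_lt.mp hfp]

theorem enumerate_pos (xs : List String) :
    ∀ p ∈ PySem.List.enumerate xs 0, 0 ≤ p.1 := by
  intro p hp
  rw [PySem.List.mem_enumerate_iff] at hp
  obtain ⟨k, hk, rfl⟩ := hp
  simp

-- ===== VERDICT (by name: the statement is the Claim_ definition above) =====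
theorem find_language_spec : Claim_equal_find_language := by
  intro languages language _
  unfold Spec_find_language find_language find_language_alt
  rw [pvLoopB_eq languages (PySem.Str.lower language) (PySem.List.enumerate languages 0) (-1)
      (enumerate_pos languages)]
  rw [← enumerate_map_lower]
  norm_num
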